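-- pv_equiv track=rewrite | github.com/Workwrite-Niidome/voynich-manuscript-analysis | homophone_collapse_v2.py | bigram_contexts
-- ===== SOURCE A (Python) =====
-- from collections import Counter, defaultdict
--
-- def bigram_contexts(words):
--     """For each character, compute left-context and right-context distributions."""
--     left_ctx = defaultdict(Counter)   # what appears before char
--     right_ctx = defaultdict(Counter)  # what appears after char
--
--     for w in words:
--         padded = '^' + w + '$'  # start/end markers
--         for i in range(1, len(padded) - 1):
--             c = padded[i]
--             left_ctx[c][padded[i-1]] += 1
--             right_ctx[c][padded[i+1]] += 1
--
--     return left_ctx, right_ctx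
-- ===== SOURCE B (Python) =====
-- from collections import Counter, defaultdict
--
-- def bigram_contexts(words):
--     """For each character, compute left-context and right-context distributions."""
--     # Pass 1: one global table of adjacent pairs, words padded with None boundary markers.
--     bigrams = Counter()
--     for w in words:
--         chars = list(w)
--         for pair in zip([None] + chars, chars + [None]):
--             bigrams[pair] += 1
--
--     # Pass 2: distribute each pair's count into the two context tables.
--     left_ctx = defaultdict(Counter)
--     right_ctx = defaultdict(Counter)
--     for (a, b), n in bigrams.items():
--         if b is not None:
--             left_ctx[b]['^' if a is None else a] += n
--         if a is not None:
--             right_ctx[a]['$' if b is None else b] += n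
--     return left_ctx, right_ctx
-- ===== Notes on version B (the rewrite author's own statement) =====
-- stated objective: alternative
-- what changed: A walks each word once and, for every character, updates both its left- and right-context counters from its two neighbours; B instead builds one global Counter of adjacent (None-padded) bigrams in a first pass and then distributes each bigram's total count into left_ctx/right_ctx in a second pass over the table's items.
import Mathlib
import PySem

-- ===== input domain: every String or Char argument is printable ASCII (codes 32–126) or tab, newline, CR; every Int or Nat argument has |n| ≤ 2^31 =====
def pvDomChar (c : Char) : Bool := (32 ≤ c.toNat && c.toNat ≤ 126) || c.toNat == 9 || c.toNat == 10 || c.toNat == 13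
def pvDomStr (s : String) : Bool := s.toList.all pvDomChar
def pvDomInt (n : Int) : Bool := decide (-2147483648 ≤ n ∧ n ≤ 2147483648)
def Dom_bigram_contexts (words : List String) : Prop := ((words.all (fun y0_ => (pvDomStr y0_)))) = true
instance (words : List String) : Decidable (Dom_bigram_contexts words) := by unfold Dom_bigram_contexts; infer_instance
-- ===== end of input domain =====

-- B replaces A's per-character two-sided neighbour pass by one global bigram table built first and
-- then distributed into the two context dicts (alternative decomposition, same cost class).

-- ===== PORT A =====
abbrev pvCtx := PySem.Dict String (PySem.Dict String Int)

-- a one-character Python string (padded[i] etc.)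
def pvKey (c : Char) : String := String.ofList [c]

-- A's inner loop 'for i in range(1, len(padded) - 1)' transliterated as a window recursion over
-- padded = '^' :: w.toList ++ ['$']: at each step `prev` is padded[i-1], `b` is padded[i] (the
-- current inner character) and `c` is padded[i+1]; same iterations, same updates, same order.
-- 'left_ctx[c][padded[i-1]] += 1' on a defaultdict(Counter) is Dict.modify with default empty
-- inner dict, the inner '+= 1' is the inner Dict.modify with default 0.
def pvALoop (prev : Char) (rest : List Char)
    (st : pvCtx × pvCtx) : pvCtx × pvCtx :=
  match rest with
  | b :: c :: tail =>
      pvALoop b (c :: tail)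
        (st.1.modify (pvKey b) PySem.Dict.empty (fun inner => inner.modify (pvKey prev) 0 (· + 1)),
         st.2.modify (pvKey b) PySem.Dict.empty (fun inner => inner.modify (pvKey c) 0 (· + 1)))
  | _ => st

def bigram_contexts (words : List String) :
    (List (String × List (String × Int))) × (List (String × List (String × Int))) :=
  let st : pvCtx × pvCtx := words.foldl (fun st w => pvALoop '^' (w.toList ++ ['$']) st)
    (PySem.Dict.empty, PySem.Dict.empty)
  -- the returned defaultdicts of Counters, as association lists
  (st.1.items.map (fun p => (p.1, p.2.items)), st.2.items.map (fun p => (p.1, p.2.items)))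

-- ===== PORT B =====
-- zip([None] + chars, chars + [None])
def pvPairs (cs : List Char) : List (Option Char × Option Char) :=
  List.zip (none :: cs.map some) (cs.map some ++ [none])

-- '^' if a is None else a   /   '$' if b is None else b
def pvLKey (a : Option Char) : String := match a with | none => "^" | some x => pvKey x
def pvRKey (b : Option Char) : String := match b with | none => "$" | some x => pvKey x

def bigram_contexts_alt (words : List String) :
    (List (String × List (String × Int))) × (List (String × List (String × Int))) :=
  -- pass 1: bigrams[pair] += 1  (a Counter over the None-padded adjacent pairs)
  let bigrams := words.foldl
    (fun d w => (pvPairs w.toList).foldl (fun d p => d.modify p 0 (· + 1)) d)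
    PySem.Dict.empty
  -- pass 2: distribute each pair's count into left_ctx / right_ctx
  let st : pvCtx × pvCtx := bigrams.items.foldl
    (fun st pn =>
      ((match pn.1.2 with
        | none => st.1
        | some c => st.1.modify (pvKey c) PySem.Dict.empty
            (fun inner => inner.modify (pvLKey pn.1.1) 0 (· + pn.2))),
       (match pn.1.1 with
        | none => st.2
        | some c => st.2.modify (pvKey c) PySem.Dict.empty
            (fun inner => inner.modify (pvRKey pn.1.2) 0 (· + pn.2)))))
    (PySem.Dict.empty, PySem.Dict.empty)
  (st.1.items.map (fun p => (p.1, p.2.items)), st.2.items.map (fun p => (p.1, p.2.items)))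

-- ===== PRECONDITION & SPEC =====
def Spec_bigram_contexts (words : List String) (out : (List (String × List (String × Int))) × (List (String × List (String × Int)))) : Prop := out = bigram_contexts_alt words
instance (words : List String) (out : (List (String × List (String × Int))) × (List (String × List (String × Int)))) : Decidable (Spec_bigram_contexts words out) := by unfold Spec_bigram_contexts; infer_instance

-- ===== CLAIM (what is proved, stated in full; the proofs are below) =====
def Claim_equal_bigram_contexts : Prop := ∀ (words : List String), Dom_bigram_contexts words → Spec_bigram_contexts words (bigram_contexts words)

-- ===== LEMMAS AND PROOFS =====

-- ctx[k1][k2] += n  on a defaultdict(Counter)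
def pvBump (d : pvCtx) (k1 k2 : String) (n : Int) : pvCtx :=
  d.modify k1 PySem.Dict.empty (fun i => i.modify k2 0 (· + n))

-- generic "maybe bump, keys read off the element" step
def pvStep {P : Type} (f? : P → Option (String × String)) (d : pvCtx) (p : P) (n : Int) : pvCtx :=
  match f? p with
  | none => d
  | some kk => pvBump d kk.1 kk.2 n

def pvLF (p : Option Char × Option Char) : Option (String × String) :=
  match p.2 with | none => none | some c => some (pvKey c, pvLKey p.1)

def pvRF (p : Option Char × Option Char) : Option (String × String) :=
  match p.1 with | none => none | some c => some (pvKey c, pvRKey p.2)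

-- adjacent pairs of a list
def pvChain : List (Option Char) → List (Option Char × Option Char)
  | x :: y :: t => (x, y) :: pvChain (y :: t)
  | _ => []

def pvPresent (d : pvCtx) (k1 k2 : String) : Prop :=
  d.contains k1 = true ∧ (d.getD k1 PySem.Dict.empty).contains k2 = true

-- two inserts at distinct keys commute when the second key is already present
theorem pv_insert_comm {κ ν : Type} [BEq κ] [LawfulBEq κ] (d : PySem.Dict κ ν) {k b : κ}
    (v1 v2 : ν) (hk : d.contains k = true) (hne : b ≠ k) :
    (d.insert b v1).insert k v2 = (d.insert k v2).insert b v1 := by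
  apply PySem.Dict.ext
  have hki : (d.insert b v1).contains k = true := by
    rw [PySem.Dict.contains_insert]; simp [hk]
  by_cases hb : d.contains b = true
  · have hbi : (d.insert k v2).contains b = true := by
      rw [PySem.Dict.contains_insert]; simp [hb]
    rw [PySem.Dict.items_insert_of_contains _ _ hki,
        PySem.Dict.items_insert_of_contains _ _ hb,
        PySem.Dict.items_insert_of_contains _ _ hbi,
        PySem.Dict.items_insert_of_contains _ _ hk,
        List.map_map, List.map_map]
    apply List.map_congr_left
    intro p _
    by_cases h1 : p.1 = b <;> by_cases h2 : p.1 = k <;>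
      simp [Function.comp, h1, h2, hne, Ne.symm hne]
  · have hb' : d.contains b = false := by simpa using hb
    have hbi : (d.insert k v2).contains b = false := by
      rw [PySem.Dict.contains_insert]; simp [hb', hne]
    rw [PySem.Dict.items_insert_of_contains _ _ hki,
        PySem.Dict.items_insert_of_not_contains _ _ hb',
        PySem.Dict.items_insert_of_not_contains _ _ hbi,
        PySem.Dict.items_insert_of_contains _ _ hk,
        List.map_append]
    simp [hne]

theorem pvBump_add (d : pvCtx) (k1 k2 : String) (m n : Int) :
    pvBump (pvBump d k1 k2 m) k1 k2 n = pvBump d k1 k2 (m + n) := by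
  simp [pvBump, PySem.Dict.modify, PySem.Dict.getD_insert_self,
        PySem.Dict.insert_insert_self, add_assoc]

theorem pvPresent_bump_self (d : pvCtx) (k1 k2 : String) (n : Int) :
    pvPresent (pvBump d k1 k2 n) k1 k2 := by
  refine ⟨?_, ?_⟩ <;>
    simp [pvBump, PySem.Dict.modify, PySem.Dict.getD_insert_self,
          PySem.Dict.contains_insert_self]

theorem pvPresent_bump (d : pvCtx) (k1 k2 a b : String) (m : Int)
    (h : pvPresent d k1 k2) : pvPresent (pvBump d a b m) k1 k2 := by
  obtain ⟨h1, h2⟩ := h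
  by_cases ha : k1 = a
  · subst ha
    refine ⟨by simp [pvBump, PySem.Dict.modify, PySem.Dict.contains_insert_self], ?_⟩
    simp only [pvBump, PySem.Dict.modify, PySem.Dict.getD_insert_self]
    rw [PySem.Dict.contains_insert]
    simp [h2]
  · refine ⟨?_, ?_⟩
    · simp only [pvBump, PySem.Dict.modify]
      rw [PySem.Dict.contains_insert]
      simp [h1]
    · simp only [pvBump, PySem.Dict.modify]
      rw [PySem.Dict.getD_insert_of_ne _ _ _ ha]
      exact h2

theorem pvBump_comm (d : pvCtx) (k1 k2 a b : String) (m : Int) (h : pvPresent d k1 k2) :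
    pvBump (pvBump d a b m) k1 k2 1 = pvBump (pvBump d k1 k2 1) a b m := by
  obtain ⟨h1, h2⟩ := h
  by_cases ha : a = k1
  · subst ha
    by_cases hb : b = k2
    · subst hb
      rw [pvBump_add, pvBump_add, add_comm]
    · -- same outer key, distinct inner keys
      simp only [pvBump, PySem.Dict.modify, PySem.Dict.getD_insert_self,
                 PySem.Dict.insert_insert_self]
      rw [PySem.Dict.getD_insert_of_ne _ _ _ (Ne.symm hb),
          PySem.Dict.getD_insert_of_ne _ _ _ hb,
          pv_insert_comm _ _ _ h2 hb]
  · -- distinct outer keys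
    simp only [pvBump, PySem.Dict.modify]
    rw [PySem.Dict.getD_insert_of_ne _ _ _ (fun e => ha e.symm),
        PySem.Dict.getD_insert_of_ne _ _ _ ha,
        pv_insert_comm _ _ _ h1 ha]

theorem pvStep_add {P : Type} (f? : P → Option (String × String)) (d : pvCtx) (p : P) (m n : Int) :
    pvStep f? (pvStep f? d p m) p n = pvStep f? d p (m + n) := by
  cases hf : f? p <;> simp [pvStep, hf, pvBump_add]

theorem pvPresent_step {P : Type} (f? : P → Option (String × String)) (d : pvCtx)
    (k1 k2 : String) (q : P) (m : Int) (h : pvPresent d k1 k2) :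
    pvPresent (pvStep f? d q m) k1 k2 := by
  cases hf : f? q <;> simp [pvStep, hf]
  · exact h
  · exact pvPresent_bump _ _ _ _ _ _ h

theorem pv_foldl_step_bump {P : Type} (f? : P → Option (String × String))
    (V : List (P × Int)) (d : pvCtx) (k1 k2 : String) (h : pvPresent d k1 k2) :
    V.foldl (fun d pn => pvStep f? d pn.1 pn.2) (pvBump d k1 k2 1)
      = pvBump (V.foldl (fun d pn => pvStep f? d pn.1 pn.2) d) k1 k2 1 := by
  induction V generalizing d with
  | nil => rfl
  | cons qn V IH =>
      simp only [List.foldl_cons]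
      have hc : pvStep f? (pvBump d k1 k2 1) qn.1 qn.2
          = pvBump (pvStep f? d qn.1 qn.2) k1 k2 1 := by
        cases hf : f? qn.1 <;> simp [pvStep, hf]
        exact (pvBump_comm _ _ _ _ _ _ h).symm
      rw [hc, IH _ (pvPresent_step _ _ _ _ _ _ h)]

-- the grouping theorem: folding the counter's items with counted bumps equals
-- folding the raw stream with unit bumps
theorem pvGroup {P : Type} [BEq P] [LawfulBEq P] (f? : P → Option (String × String)) (S : List P) :
    ((PySem.Dict.counter S).items).foldl (fun d pn => pvStep f? d pn.1 pn.2) PySem.Dict.empty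
      = S.foldl (fun d p => pvStep f? d p 1) PySem.Dict.empty := by
  induction S using List.reverseRecOn with
  | nil => rfl
  | append_singleton S p IH =>
    rw [PySem.Dict.items_counter] at IH ⊢
    rw [List.foldl_append, List.foldl_cons, List.foldl_nil,
        PySem.Set.ofList_append_singleton]
    by_cases hp : p ∈ S
    · -- p already counted: its entry is incremented in place
      have hps : p ∈ PySem.Set.ofList S := (PySem.Set.mem_ofList S p).mpr hp
      have hct : (PySem.Set.ofList S).contains p = true :=
        (PySem.Set.contains_iff _ _).mpr hps
      have hadd : (PySem.Set.ofList S).add p = PySem.Set.ofList S := by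
        simp [PySem.Set.add, hp]
      rw [hadd, ← IH]
      obtain ⟨u, v, huv⟩ := List.append_of_mem hps
      have hnd : (PySem.Set.ofList S).Nodup := PySem.Set.nodup_ofList S
      rw [huv] at hnd
      have hpu : p ∉ u := by
        intro hc; exact (List.disjoint_of_nodup_append hnd) hc (by simp)
      have hpv : p ∉ v := by
        have := List.Nodup.of_append_right hnd
        simp only [List.nodup_cons] at this; exact this.1
      rw [huv, List.map_append, List.map_append, List.map_cons, List.map_cons,
          List.foldl_append, List.foldl_append, List.foldl_cons, List.foldl_cons]
      have hcu : ∀ q ∈ u, (q, ((S ++ [p]).count q : Int)) = (q, (S.count q : Int)) := by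
        intro q hq
        have : q ≠ p := fun e => hpu (e ▸ hq)
        simp [List.count_append, Ne.symm this]
      have hcv : ∀ q ∈ v, (q, ((S ++ [p]).count q : Int)) = (q, (S.count q : Int)) := by
        intro q hq
        have : q ≠ p := fun e => hpv (e ▸ hq)
        simp [List.count_append, Ne.symm this]
      rw [List.map_congr_left hcu, List.map_congr_left hcv]
      have hcp : ((S ++ [p]).count p : Int) = (S.count p : Int) + 1 := by
        simp [List.count_append]
      rw [hcp]
      have hd0 : ∃ d0 : pvCtx, (List.map (fun k => (k, (List.count k S : Int))) u).foldl
          (fun d pn => pvStep f? d pn.1 pn.2) PySem.Dict.empty = d0 := ⟨_, rfl⟩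
      obtain ⟨d0, hd0⟩ := hd0
      show (List.map (fun k => (k, (List.count k S : Int))) v).foldl
            (fun d pn => pvStep f? d pn.1 pn.2)
            (pvStep f? ((List.map (fun k => (k, (List.count k S : Int))) u).foldl
              (fun d pn => pvStep f? d pn.1 pn.2) PySem.Dict.empty) p ((List.count p S : Int) + 1))
        = pvStep f? ((List.map (fun k => (k, (List.count k S : Int))) v).foldl
            (fun d pn => pvStep f? d pn.1 pn.2)
            (pvStep f? ((List.map (fun k => (k, (List.count k S : Int))) u).foldl
              (fun d pn => pvStep f? d pn.1 pn.2) PySem.Dict.empty) p (List.count p S : Int))) p 1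
      rw [hd0]
      rw [← pvStep_add f? d0 p _ 1]
      cases hf : f? p with
      | none => simp [pvStep, hf]
      | some kk =>
          have hpres : pvPresent (pvStep f? d0 p (S.count p : Int)) kk.1 kk.2 := by
            simp only [pvStep, hf]; exact pvPresent_bump_self _ _ _ _
          have := pv_foldl_step_bump f? (List.map (fun k => (k, (S.count k : Int))) v)
            (pvStep f? d0 p (S.count p : Int)) kk.1 kk.2 hpres
          simpa [pvStep, hf] using this
    · -- fresh pair: appended with count 1
      have hps : p ∉ PySem.Set.ofList S := fun hc => hp ((PySem.Set.mem_ofList S p).mp hc)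
      have hadd : (PySem.Set.ofList S).add p = PySem.Set.ofList S ++ [p] := by
        have : (PySem.Set.ofList S).contains p = false := by
          rw [← Bool.not_eq_true]; intro hc; exact hps ((PySem.Set.contains_iff _ _).mp hc)
        simp [PySem.Set.add, hp]
      rw [hadd]
      simp only [List.map_append, List.map_cons, List.map_nil, List.foldl_append,
        List.foldl_cons, List.foldl_nil]
      have hcS : ∀ q ∈ PySem.Set.ofList S,
          (q, ((S ++ [p]).count q : Int)) = (q, (S.count q : Int)) := by
        intro q hq
        have : q ≠ p := fun e => hp (e ▸ (PySem.Set.mem_ofList S q).mp hq)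
        simp [List.count_append, Ne.symm this]
      rw [List.map_congr_left hcS, IH]
      have : ((S ++ [p]).count p : Int) = 1 := by
        simp [List.count_append, List.count_eq_zero_of_not_mem hp]
      rw [this]

-- A's window recursion computes two independent folds over the adjacent-pair chains
theorem pvALoop_eq (cs : List Char) : ∀ (prev : Char) (L R : pvCtx),
    pvALoop prev (cs ++ ['$']) (L, R) =
      (List.foldl (fun d p => pvStep pvLF d p 1) L (pvChain (some prev :: cs.map some)),
       List.foldl (fun d p => pvStep pvRF d p 1) R (pvChain (cs.map some ++ [none]))) := by
  induction cs with
  | nil => intro prev L R; rfl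
  | cons b t IH =>
      intro prev L R
      cases t with
      | nil =>
          show pvALoop prev [b, '$'] (L, R) = _
          simp [pvALoop, pvChain, pvStep, pvLF, pvRF, pvLKey, pvRKey, pvBump,
                show pvKey '$' = "$" from rfl]
      | cons c t' =>
          show pvALoop prev (b :: ((c :: t') ++ ['$'])) (L, R) = _
          rw [show pvALoop prev (b :: ((c :: t') ++ ['$'])) (L, R)
                = pvALoop b ((c :: t') ++ ['$'])
                    (L.modify (pvKey b) PySem.Dict.empty
                      (fun inner => inner.modify (pvKey prev) 0 (· + 1)),
                     R.modify (pvKey b) PySem.Dict.empty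
                      (fun inner => inner.modify (pvKey c) 0 (· + 1))) from rfl,
              IH]
          rfl

theorem pvChain_snoc (ys : List (Option Char)) : ∀ (y0 z : Option Char),
    pvChain (y0 :: (ys ++ [z])) = pvChain (y0 :: ys) ++ [((y0 :: ys).getLast (by simp), z)] := by
  induction ys with
  | nil => intro y0 z; rfl
  | cons y ys IH =>
      intro y0 z
      simp only [List.cons_append, pvChain]
      rw [IH y z]
      simp [List.getLast]

-- replacing the '^' head marker by the None marker does not change the left fold
theorem pv_hat_head (cs : List Char) (L : pvCtx) :
    List.foldl (fun d p => pvStep pvLF d p 1) L (pvChain (some '^' :: cs.map some))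
      = List.foldl (fun d p => pvStep pvLF d p 1) L (pvChain ((none : Option Char) :: cs.map some)) := by
  cases cs with
  | nil => rfl
  | cons c cs => simp [pvChain, pvStep, pvLF, pvLKey, show pvKey '^' = "^" from rfl]

-- the trailing (last, None) pair is skipped by the left fold
theorem pv_left_dropnone (cs : List Char) (L : pvCtx) :
    List.foldl (fun d p => pvStep pvLF d p 1) L (pvChain ((none : Option Char) :: cs.map some ++ [none]))
      = List.foldl (fun d p => pvStep pvLF d p 1) L (pvChain ((none : Option Char) :: cs.map some)) := by
  rw [show ((none : Option Char) :: cs.map some ++ [none])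
        = (none : Option Char) :: (cs.map some ++ [none]) from rfl,
      pvChain_snoc, List.foldl_append]
  simp [pvStep, pvLF]

-- the heading (None, first) pair is skipped by the right fold
theorem pv_right_dropnone (cs : List Char) (R : pvCtx) :
    List.foldl (fun d p => pvStep pvRF d p 1) R (pvChain ((none : Option Char) :: cs.map some ++ [none]))
      = List.foldl (fun d p => pvStep pvRF d p 1) R (pvChain (cs.map some ++ [none])) := by
  cases cs with
  | nil => rfl
  | cons c cs => simp [pvChain, pvStep, pvRF]

-- zip([None]+chars, chars+[None]) is the adjacent-pair chain of the padded sequence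
theorem pvPairs_eq_chain_aux (l : List (Option Char)) : ∀ (x z : Option Char),
    List.zip (x :: l) (l ++ [z]) = pvChain (x :: (l ++ [z])) := by
  induction l with
  | nil => intro x z; rfl
  | cons y l IH => intro x z; simpa [pvChain, List.zip] using IH y z

theorem pvPairs_eq_chain (cs : List Char) :
    pvPairs cs = pvChain ((none : Option Char) :: cs.map some ++ [none]) :=
  pvPairs_eq_chain_aux (cs.map some) none none

-- the padded pair stream of the whole input
def pvS (words : List String) : List (Option Char × Option Char) :=
  words.flatMap (fun w => pvChain ((none : Option Char) :: w.toList.map some ++ [none]))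

theorem pvA_fold (words : List String) : ∀ (L R : pvCtx),
    words.foldl (fun st w => pvALoop '^' (w.toList ++ ['$']) st) (L, R)
      = (words.foldl (fun d w =>
            List.foldl (fun d p => pvStep pvLF d p 1) d
              (pvChain ((none : Option Char) :: w.toList.map some ++ [none]))) L,
         words.foldl (fun d w =>
            List.foldl (fun d p => pvStep pvRF d p 1) d
              (pvChain ((none : Option Char) :: w.toList.map some ++ [none]))) R) := by
  induction words with
  | nil => intro L R; rfl
  | cons w ws IH =>
      intro L R
      simp only [List.foldl_cons]
      rw [pvALoop_eq, pv_hat_head, ← pv_left_dropnone, ← pv_right_dropnone, IH]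

theorem pv_main (words : List String) : bigram_contexts words = bigram_contexts_alt words := by
  unfold bigram_contexts bigram_contexts_alt
  simp only []
  rw [pvA_fold]
  -- A's two word-level folds are folds over the concatenated pair stream
  have hA1 : words.foldl (fun d w =>
        List.foldl (fun d p => pvStep pvLF d p 1) d
          (pvChain ((none : Option Char) :: w.toList.map some ++ [none]))) PySem.Dict.empty
      = (pvS words).foldl (fun d p => pvStep pvLF d p 1) PySem.Dict.empty := by
    rw [pvS, List.foldl_flatMap]
  have hA2 : words.foldl (fun d w =>
        List.foldl (fun d p => pvStep pvRF d p 1) d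
          (pvChain ((none : Option Char) :: w.toList.map some ++ [none]))) PySem.Dict.empty
      = (pvS words).foldl (fun d p => pvStep pvRF d p 1) PySem.Dict.empty := by
    rw [pvS, List.foldl_flatMap]
  -- B's first pass is the counter of the same stream
  have hBig : words.foldl
        (fun d w => (pvPairs w.toList).foldl (fun d p => d.modify p 0 (· + 1)) d)
        PySem.Dict.empty
      = PySem.Dict.counter (pvS words) := by
    rw [PySem.Dict.counter_eq_foldl, pvS, List.foldl_flatMap]
    congr 1
    funext d w
    rw [pvPairs_eq_chain]
  rw [hA1, hA2, hBig]
  -- B's second pass splits into two independent folds over the counter's items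
  rw [PySem.List.foldl_prod_mk
        (fun (d : pvCtx) (pn : (Option Char × Option Char) × Int) =>
          (match pn.1.2 with
           | none => d
           | some c => d.modify (pvKey c) PySem.Dict.empty
               (fun inner => inner.modify (pvLKey pn.1.1) 0 (· + pn.2))))
        (fun (d : pvCtx) (pn : (Option Char × Option Char) × Int) =>
          (match pn.1.1 with
           | none => d
           | some c => d.modify (pvKey c) PySem.Dict.empty
               (fun inner => inner.modify (pvRKey pn.1.2) 0 (· + pn.2))))]
  have hL : (fun (d : pvCtx) (pn : (Option Char × Option Char) × Int) =>
        (match pn.1.2 with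
         | none => d
         | some c => d.modify (pvKey c) PySem.Dict.empty
             (fun inner => inner.modify (pvLKey pn.1.1) 0 (· + pn.2))))
      = fun d pn => pvStep pvLF d pn.1 pn.2 := by
    funext d pn
    obtain ⟨⟨a, b⟩, n⟩ := pn
    cases b <;> rfl
  have hR : (fun (d : pvCtx) (pn : (Option Char × Option Char) × Int) =>
        (match pn.1.1 with
         | none => d
         | some c => d.modify (pvKey c) PySem.Dict.empty
             (fun inner => inner.modify (pvRKey pn.1.2) 0 (· + pn.2))))
      = fun d pn => pvStep pvRF d pn.1 pn.2 := by
    funext d pn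
    obtain ⟨⟨a, b⟩, n⟩ := pn
    cases a <;> rfl
  rw [hL, hR, pvGroup pvLF (pvS words), pvGroup pvRF (pvS words)]

-- ===== VERDICT (by name: the statement is the Claim_ definition above) =====
theorem bigram_contexts_spec : Claim_equal_bigram_contexts := by
  intro words _
  show bigram_contexts words = bigram_contexts_alt words
  exact pv_main words
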